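-- pv_equiv track=rewrite | github.com/pypi-data/pypi-mirror-401 | packages/robotframework-find-unused/robotframework_find_unused-0.5.0-py3-none-any.whl/robotframework_find_unused/common/parse.py | _find_variable_end
-- ===== SOURCE A (Python) =====
-- def _find_variable_end(string: str) -> tuple[str, str | None]:
--     variable = ""
--     depth = 0
--     while len(string) > 0:
--         char = string[0]
--         if char == "{":
--             depth += 1
--         if char == "}":
--             depth -= 1
--
--         variable += char
--         string = string[1:]
--
--         if char == "}" and depth == 0:
--             break
--
--     return (string, variable or None)
-- ===== SOURCE B (Python) =====
-- def _find_variable_end(string: str) -> tuple[str, str | None]: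
--     # Single O(n) scan tracking brace depth; slice once at the matching '}'.
--     depth = 0
--     for i, char in enumerate(string):
--         if char == "{":
--             depth += 1
--         elif char == "}":
--             depth -= 1
--             if depth == 0:
--                 return (string[i + 1:], string[:i + 1])
--     return ("", string or None)
-- ===== Notes on version B (the rewrite author's own statement) =====
-- stated objective: faster
-- what changed: Instead of rebuilding both strings one character at a time (string = string[1:], variable += char), B scans by index tracking brace depth and slices the string exactly once at the matching brace.
import Mathlib
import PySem

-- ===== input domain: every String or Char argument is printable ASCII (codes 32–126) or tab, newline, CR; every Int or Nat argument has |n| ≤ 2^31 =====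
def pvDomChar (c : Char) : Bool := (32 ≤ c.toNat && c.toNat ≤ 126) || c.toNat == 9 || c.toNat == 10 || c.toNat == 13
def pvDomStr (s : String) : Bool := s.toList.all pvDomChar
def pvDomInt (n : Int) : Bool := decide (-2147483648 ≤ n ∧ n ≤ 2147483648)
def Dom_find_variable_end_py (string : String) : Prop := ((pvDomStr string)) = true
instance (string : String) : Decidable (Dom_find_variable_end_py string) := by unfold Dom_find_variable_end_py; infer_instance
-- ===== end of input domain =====

-- B replaces A's per-character string rebuilding with one index scan and a single slice (faster).

-- ===== PORT A =====
-- A's while loop: consumes `string` char by char, appending to `var` (Python's `variable`), tracking depth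
def goA : List Char → List Char → Int → List Char × List Char
  | [], var, _ => ([], var)
  | c :: rest, var, depth =>
    let d1 := if c = '{' then depth + 1 else depth
    let d2 := if c = '}' then d1 - 1 else d1
    let var2 := var ++ [c]
    if c = '}' ∧ d2 = 0 then (rest, var2) else goA rest var2 d2

def find_variable_end_py (string : String) : String × Option String :=
  let r := goA string.toList [] 0
  (String.ofList r.1, if r.2 = [] then none else some (String.ofList r.2))

-- ===== PORT B =====
-- B's for loop: returns the index of the brace where depth returns to 0, if any
def goB : List Char → Int → Option Nat
  | [], _ => none
  | c :: rest, depth =>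
    if c = '{' then (goB rest (depth + 1)).map (· + 1)
    else if c = '}' then
      if depth - 1 = 0 then some 0 else (goB rest (depth - 1)).map (· + 1)
    else (goB rest depth).map (· + 1)

def find_variable_end_py_alt (string : String) : String × Option String :=
  let cs := string.toList
  match goB cs 0 with
  | some i => (String.ofList (cs.drop (i + 1)), some (String.ofList (cs.take (i + 1))))
  | none => ("", if cs = [] then none else some string)

-- ===== PRECONDITION & SPEC =====
def Spec_find_variable_end_py (string : String) (out : String × Option String) : Prop := out = find_variable_end_py_alt string
instance (string : String) (out : String × Option String) : Decidable (Spec_find_variable_end_py string out) := by unfold Spec_find_variable_end_py; infer_instance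

-- ===== CLAIM (what is proved, stated in full; the proofs are below) =====
def Claim_equal_find_variable_end_py : Prop := ∀ (string : String), Dom_find_variable_end_py string → Spec_find_variable_end_py string (find_variable_end_py string)

-- ===== LEMMAS AND PROOFS =====

theorem goA_eq_goB (s : List Char) : ∀ (acc : List Char) (depth : Int),
    goA s acc depth = match goB s depth with
      | some i => (s.drop (i + 1), acc ++ s.take (i + 1))
      | none => ([], acc ++ s) := by
  induction s with
  | nil => intro acc depth; simp [goA, goB]
  | cons c rest ih =>
    intro acc depth
    by_cases hb : c = '{'
    · subst hb
      simp only [goA, goB]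
      rw [ih]
      cases h : goB rest (depth + 1) <;> simp [h]
    · by_cases hc : c = '}'
      · subst hc
        simp only [goA, goB, if_neg hb]
        by_cases hd : depth - 1 = 0
        · simp [hd]
        · rw [ih]
          cases h : goB rest (depth - 1) <;> simp [h, hd]
      · simp only [goA, goB, if_neg hb, if_neg hc]
        rw [ih]
        cases h : goB rest depth
        · simp [hc]
        · simp [h, hc]

theorem goB_ne_nil (s : List Char) (d : Int) (i : Nat) (h : goB s d = some i) : s ≠ [] := by
  intro he; subst he; simp [goB] at h

-- ===== VERDICT (by name: the statement is the Claim_ definition above) =====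
theorem find_variable_end_py_spec : Claim_equal_find_variable_end_py := by
  intro s _
  unfold Spec_find_variable_end_py find_variable_end_py find_variable_end_py_alt
  rw [goA_eq_goB]
  cases h : goB s.toList 0 with
  | none =>
    by_cases he : s.toList = []
    · simp [he, goB]
    · simp [h]
  | some i =>
    have hne : s.toList ≠ [] := goB_ne_nil _ _ _ h
    simp [h, List.take_eq_nil_iff, hne]
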